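-- pv_equiv track=rewrite | github.com/Nyggi/AdventOfCode | 2021/09/main.py | calc_total_bassin_size
-- ===== SOURCE A (Python) =====
-- from collections import defaultdict
--
-- def calc_total_bassin_size(bassins):
--     unique_bassins = defaultdict(list)
--     for bassin in bassins:
--         if bassin not in unique_bassins[len(bassin)]:
--             unique_bassins[len(bassin)].append(bassin)
--
--     bassins_to_add = 3
--
--     total_bassin_size = 1
--
--     for bassin_length in sorted(unique_bassins.keys(), reverse=True):
--         for bassin in unique_bassins[bassin_length]:
--             if bassins_to_add == 0:
--                 break
--             total_bassin_size *= bassin_length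
--             bassins_to_add -= 1
--
--     return total_bassin_size
-- ===== SOURCE B (Python) =====
-- def calc_total_bassin_size(bassins):
--     # One pass: dedup on the fly with a seen-set while maintaining the three
--     # largest lengths in three registers -- no dict, no sorting.
--     seen = set()
--     t1 = t2 = t3 = None
--     for b in bassins:
--         tb = tuple(b)
--         if tb in seen:
--             continue
--         seen.add(tb)
--         n = len(b)
--         if t1 is None or n > t1:
--             t1, t2, t3 = n, t1, t2
--         elif t2 is None or n > t2:
--             t2, t3 = n, t2
--         elif t3 is None or n > t3:
--             t3 = n
--     total = 1
--     for t in (t1, t2, t3):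
--         if t is not None:
--             total *= t
--     return total
-- ===== Notes on version B (the rewrite author's own statement) =====
-- stated objective: alternative
-- what changed: Replaces A's length-keyed defaultdict of deduplicated bassin lists plus a nested loop over descending sorted keys with a single streaming pass that dedups via a seen-set and maintains the three largest lengths in three registers (an online top-3 selection, no dict and no sort).
import Mathlib
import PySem

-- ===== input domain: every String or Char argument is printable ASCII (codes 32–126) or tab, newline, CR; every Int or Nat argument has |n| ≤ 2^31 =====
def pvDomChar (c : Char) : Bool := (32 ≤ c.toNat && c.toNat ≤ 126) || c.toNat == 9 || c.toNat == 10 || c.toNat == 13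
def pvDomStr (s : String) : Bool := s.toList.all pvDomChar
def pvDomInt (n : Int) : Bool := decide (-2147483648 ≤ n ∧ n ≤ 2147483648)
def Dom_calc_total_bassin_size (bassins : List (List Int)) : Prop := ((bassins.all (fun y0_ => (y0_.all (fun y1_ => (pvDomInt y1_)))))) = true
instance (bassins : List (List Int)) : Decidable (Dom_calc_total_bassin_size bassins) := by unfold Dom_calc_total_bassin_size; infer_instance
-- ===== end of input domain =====

-- B replaces A's length-keyed defaultdict plus nested descending-key loop with a single
-- streaming pass: dedup via a seen-set while keeping the three largest lengths in three
-- registers — an online top-3 selection, no dict and no sort (objective: alternative).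

-- ===== PORT A =====
-- inner 'for bassin in unique_bassins[bassin_length]: if bassins_to_add == 0: break …'
def pvInnerA (k : Int) (bs : List (List Int)) (st : Int × Int) : Int × Int :=
  match bs with
  | [] => st
  | _ :: rest => if st.1 = 0 then st else pvInnerA k rest (st.1 - 1, st.2 * k)

def calc_total_bassin_size (bassins : List (List Int)) : Int :=
  -- unique_bassins: defaultdict(list); accessing unique_bassins[len(bassin)] inserts the key
  let ub : PySem.Dict Int (List (List Int)) :=
    bassins.foldl (fun d b =>
      d.modify ((b.length : Int)) [] (fun lst => if lst.contains b then lst else lst ++ [b]))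
      PySem.Dict.empty
  let st := (PySem.List.sorted ub.keys (fun x => x) true).foldl
      (fun st k => pvInnerA k (ub.getD k []) st) (3, 1)
  st.2

-- ===== PORT B =====
-- the three-way 'if t1 is None or n > t1 … elif … elif …' register update
def pvStepB (st : Option Int × Option Int × Option Int) (n : Int) :
    Option Int × Option Int × Option Int :=
  if (match st.1 with | none => true | some v => decide (v < n)) then (some n, st.1, st.2.1)
  else if (match st.2.1 with | none => true | some v => decide (v < n)) then (st.1, some n, st.2.1)
  else if (match st.2.2 with | none => true | some v => decide (v < n)) then (st.1, st.2.1, some n)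
  else st

-- 'for t in (t1, t2, t3): if t is not None: total *= t'
def pvReadB (t : Option Int × Option Int × Option Int) : Int :=
  [t.1, t.2.1, t.2.2].foldl (fun acc o => match o with | none => acc | some v => acc * v) 1

def calc_total_bassin_size_alt (bassins : List (List Int)) : Int :=
  pvReadB (bassins.foldl
    (fun (st : PySem.Set (List Int) × (Option Int × Option Int × Option Int)) b =>
      if PySem.Set.contains st.1 b then st              -- 'if tb in seen: continue'
      else (PySem.Set.add st.1 b, pvStepB st.2 (b.length : Int)))
    (PySem.Set.empty, (none, none, none))).2

-- ===== PRECONDITION & SPEC =====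
def Spec_calc_total_bassin_size (bassins : List (List Int)) (out : Int) : Prop := out = calc_total_bassin_size_alt bassins
instance (bassins : List (List Int)) (out : Int) : Decidable (Spec_calc_total_bassin_size bassins out) := by unfold Spec_calc_total_bassin_size; infer_instance

-- ===== CLAIM (what is proved, stated in full; the proofs are below) =====
def Claim_equal_calc_total_bassin_size : Prop := ∀ (bassins : List (List Int)), Dom_calc_total_bassin_size bassins → Spec_calc_total_bassin_size bassins (calc_total_bassin_size bassins)

-- ===== LEMMAS AND PROOFS =====

-- descending order on Int, as used for both sides' characterisation
abbrev pvR (a b : Int) : Prop := b ≤ a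

-- A's fold step building the defaultdict
def pvStepA (d : PySem.Dict Int (List (List Int))) (b : List Int) : PySem.Dict Int (List (List Int)) :=
  d.modify ((b.length : Int)) [] (fun lst => if lst.contains b then lst else lst ++ [b])

-- the break-counting step, on the flattened sequence of lengths
def pvStep2 (st : Int × Int) (x : Int) : Int × Int :=
  if st.1 = 0 then st else (st.1 - 1, st.2 * x)

-- the first three entries of a list, as B's register triple
def pvTriple (s : List Int) : Option Int × Option Int × Option Int := (s[0]?, s[1]?, s[2]?)

-- the list of elements B's seen-set fold actually processes (first occurrences not in S)
def pvNew (S : List (List Int)) (bs : List (List Int)) : List (List Int) :=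
  match bs with
  | [] => []
  | b :: rest => if S.contains b then pvNew S rest else b :: pvNew (S ++ [b]) rest

lemma pvInnerA_eq_foldl (k : Int) (bs : List (List Int)) (st : Int × Int) :
    pvInnerA k bs st = (List.replicate bs.length k).foldl pvStep2 st := by
  induction bs generalizing st with
  | nil => rfl
  | cons b rest ih =>
      simp only [pvInnerA, List.length_cons, List.replicate_succ, List.foldl_cons, pvStep2]
      split_ifs with h
      · have : ∀ n st, st.1 = 0 → (List.replicate n k).foldl pvStep2 st = st := by
          intro n
          induction n with
          | zero => intro st h; rfl
          | succ m ihm =>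
              intro st h
              simp only [List.replicate_succ, List.foldl_cons, pvStep2, h, if_pos]
              exact ihm st h
        exact (this _ _ h).symm
      · exact ih _

lemma pvFoldl_step2_spec (xs : List Int) (t p : Int) (ht : 0 ≤ t) :
    (xs.foldl pvStep2 (t, p)).2 = p * (xs.take t.toNat).prod := by
  induction xs generalizing t p with
  | nil => simp
  | cons x rest ih =>
      by_cases h : t = 0
      · subst h
        have : ∀ ys : List Int, (ys.foldl pvStep2 ((0 : Int), p)) = (0, p) := by
          intro ys; induction ys with
          | nil => rfl
          | cons y r ihr => simpa [pvStep2] using ihr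
        simp [this]
      · have ht' : 0 < t := lt_of_le_of_ne ht (Ne.symm h)
        have : t.toNat = (t - 1).toNat + 1 := by omega
        simp only [List.foldl_cons, pvStep2, h, if_false, this, List.take_succ_cons, List.prod_cons]
        rw [ih (t - 1) (p * x) (by omega)]
        ring

-- bucket contents of A's defaultdict
lemma pvBucket (bassins : List (List Int)) (d : PySem.Dict Int (List (List Int))) (k : Int) :
    ((bassins.foldl pvStepA d).getD k []) =
      PySem.Set.update (d.getD k []) (bassins.filter (fun b => (b.length : Int) == k)) := by
  induction bassins generalizing d with
  | nil => rfl
  | cons b rest ih =>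
      simp only [List.foldl_cons, List.filter_cons]
      by_cases hk : (b.length : Int) = k
      · simp only [show ((b.length : Int) == k) = true by simp [hk], if_true, ih]
        have h2 : (pvStepA d b).getD k [] = PySem.Set.add (d.getD k []) b := by
          simp only [pvStepA, hk, PySem.Dict.getD_modify_self]; rfl
        rw [h2]; rfl
      · simp only [show ((b.length : Int) == k) = false by simp [hk], Bool.false_eq_true,
          if_false, ih]
        have h2 : (pvStepA d b).getD k [] = d.getD k [] := by
          simp only [pvStepA]; exact PySem.Dict.getD_modify_of_ne d [] _ (Ne.symm hk)
        rw [h2]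

-- ofList commutes with filter (first-occurrence dedup of a filtered list)
lemma pvOfList_filter (p : List Int → Bool) (xs : List (List Int)) :
    PySem.Set.ofList (xs.filter p) = (PySem.Set.ofList xs).filter p := by
  induction xs using List.reverseRecOn with
  | nil => rfl
  | append_singleton xs x ih =>
      have hof : ∀ ys : List (List Int), PySem.Set.ofList (ys ++ [x]) = PySem.Set.add (PySem.Set.ofList ys) x := by
        intro ys; simp [PySem.Set.ofList_eq_foldl, List.foldl_append]
      by_cases hp : p x
      · simp only [List.filter_append, List.filter_singleton, hp, cond_true, hof, ih,
          PySem.Set.add]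
        by_cases hx : x ∈ xs
        · simp [hx, hp]
        · simp [hx, hp, List.filter_append]
      · have hp' : p x = false := by simpa using hp
        simp only [List.filter_append, List.filter_singleton, hp', cond_false, List.append_nil,
          hof, ih, PySem.Set.add]
        by_cases hx : x ∈ xs
        · simp [hx]
        · simp [hx, List.filter_append, hp']

-- pairwise ≥ survives flatMap into constant blocks
lemma pvPairwise_flatMap (ks : List Int) (n : Int → ℕ) (h : ks.Pairwise (fun a b => b ≤ a)) :
    (ks.flatMap (fun k => List.replicate (n k) k)).Pairwise (fun a b : Int => b ≤ a) := by
  induction ks with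
  | nil => simp
  | cons k rest ih =>
      simp only [List.flatMap_cons, List.pairwise_append]
      rcases List.pairwise_cons.1 h with ⟨hk, hrest⟩
      refine ⟨List.pairwise_replicate.2 (Or.inr le_rfl), ih hrest, ?_⟩
      intro a ha b hb
      rcases List.eq_of_mem_replicate ha with rfl
      rcases List.mem_flatMap.1 hb with ⟨k', hk', hb'⟩
      rcases List.eq_of_mem_replicate hb' with rfl
      exact hk _ hk'

-- sum of an if-indicator over a nodup list
lemma pvSum_indicator (ks : List Int) (v : Int) (n : Int → ℕ) (hnd : ks.Nodup) :
    (ks.map (fun k => if k = v then n k else 0)).sum = if v ∈ ks then n v else 0 := by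
  induction ks with
  | nil => simp
  | cons k rest ih =>
      rcases List.nodup_cons.1 hnd with ⟨hk, hrest⟩
      simp only [List.map_cons, List.sum_cons, ih hrest, List.mem_cons]
      by_cases h : k = v
      · subst h
        simp [hk]
      · simp [h, Ne.symm h]

-- the flattened multiplication sequence of A equals the sorted length list of the dedup
lemma pvFlat_eq_sorted (bassins : List (List Int)) :
    (PySem.List.sorted (PySem.Set.ofList (bassins.map (fun b => (b.length : Int)))) (fun x => x) true).flatMap
        (fun k => List.replicate (PySem.Set.ofList (bassins.filter (fun b => (b.length : Int) == k))).length k)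
      = PySem.List.sorted ((PySem.Set.ofList bassins).map (fun b => (b.length : Int))) (fun x => x) true := by
  set ks := PySem.List.sorted (PySem.Set.ofList (bassins.map (fun b => (b.length : Int)))) (fun x => x) true with hks
  set D := PySem.Set.ofList bassins with hD
  set L := D.map (fun b => (b.length : Int)) with hL
  have hksnd : ks.Nodup := ((PySem.List.sorted_perm _ _ _).symm.nodup (PySem.Set.nodup_ofList _))
  have hperm : (ks.flatMap (fun k => List.replicate (PySem.Set.ofList (bassins.filter (fun b => (b.length : Int) == k))).length k)).Perm L := by
    rw [List.perm_iff_count]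
    intro v
    rw [List.count_flatMap]
    have h1 : ∀ k : Int, (List.count v ∘ fun k => List.replicate (PySem.Set.ofList (bassins.filter (fun b => (b.length : Int) == k))).length k) k
        = if k = v then (PySem.Set.ofList (bassins.filter (fun b => (b.length : Int) == k))).length else 0 := by
      intro k
      simp [List.count_replicate]
    rw [List.map_congr_left (fun k _ => h1 k), pvSum_indicator ks v _ hksnd]
    have hcount : List.count v L = List.countP (fun b => (b.length : Int) == v) D := by
      simp only [hL, List.count, List.countP_map]
      rfl
    have hbucket : (PySem.Set.ofList (bassins.filter (fun b => (b.length : Int) == v))).length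
        = List.countP (fun b => (b.length : Int) == v) D := by
      rw [pvOfList_filter, ← hD, ← List.countP_eq_length_filter]
    by_cases hv : v ∈ ks
    · rw [if_pos hv, hbucket, hcount]
    · rw [if_neg hv, hcount]
      have : ∀ b ∈ D, ¬ ((b.length : Int) == v) = true := by
        intro b hb hbv
        apply hv
        rw [hks]
        rw [PySem.List.mem_sorted]
        rw [PySem.Set.mem_ofList]
        refine List.mem_map.2 ⟨b, ?_, by simpa using hbv⟩
        exact (PySem.Set.mem_ofList bassins b).1 hb
      rw [List.countP_eq_zero.2 this]
  have hpair : (ks.flatMap (fun k => List.replicate (PySem.Set.ofList (bassins.filter (fun b => (b.length : Int) == k))).length k)).Pairwise (fun a b : Int => b ≤ a) := by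
    apply pvPairwise_flatMap
    simpa using PySem.List.sorted_pairwise_rev (PySem.Set.ofList (bassins.map (fun b => (b.length : Int)))) (fun x => x)
  have hpair2 : (PySem.List.sorted L (fun x => x) true).Pairwise (fun a b : Int => b ≤ a) := by
    simpa using PySem.List.sorted_pairwise_rev L (fun x => x)
  exact List.Perm.eq_of_pairwise (fun a b _ _ h1 h2 => le_antisymm h2 h1) hpair hpair2
    (hperm.trans (PySem.List.sorted_perm L (fun x => x) true).symm)

-- descending pairwise is preserved by ordered insertion (totality of ≤ used inline)
lemma pvOI_pairwise (n : Int) (l : List Int) (h : l.Pairwise pvR) :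
    (List.orderedInsert pvR n l).Pairwise pvR := by
  induction l with
  | nil => simp [pvR]
  | cons a t ih =>
      rcases List.pairwise_cons.1 h with ⟨ha, ht⟩
      by_cases hna : pvR n a
      · rw [List.orderedInsert_cons_of_le _ _ hna]
        refine List.pairwise_cons.2 ⟨?_, h⟩
        intro b hb
        rcases List.mem_cons.1 hb with rfl | hb
        · exact hna
        · exact le_trans (ha b hb) hna
      · rw [List.orderedInsert_of_not_le _ _ hna]
        refine List.pairwise_cons.2 ⟨?_, ih ht⟩
        intro c hc
        rcases (List.mem_orderedInsert pvR).1 hc with rfl | hc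
        · unfold pvR at *; omega
        · exact ha c hc

lemma pvSort_pairwise (l : List Int) : (List.insertionSort pvR l).Pairwise pvR := by
  induction l with
  | nil => simp
  | cons a t ih => simpa using pvOI_pairwise a _ ih

-- PySem's descending sort is insertion sort by pvR (both are the ≥-sorted permutation)
lemma pvSorted_eq_insertionSort (L : List Int) :
    PySem.List.sorted L (fun x => x) true = List.insertionSort pvR L := by
  refine List.Perm.eq_of_pairwise (fun a b _ _ h1 h2 => le_antisymm h2 h1) ?_ (pvSort_pairwise L)
    ((PySem.List.sorted_perm L (fun x => x) true).trans (List.perm_insertionSort pvR L).symm)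
  simpa [pvR] using PySem.List.sorted_pairwise_rev L (fun x => x)

-- appending one element to an insertion sort = one ordered insert
lemma pvInsertionSort_append (L : List Int) (n : Int) :
    List.insertionSort pvR (L ++ [n]) = List.orderedInsert pvR n (List.insertionSort pvR L) := by
  refine List.Perm.eq_of_pairwise (fun a b _ _ h1 h2 => le_antisymm h2 h1)
    (pvSort_pairwise _) (pvOI_pairwise n _ (pvSort_pairwise L)) ?_
  exact ((List.perm_insertionSort pvR _).trans
    ((List.perm_append_singleton n L).trans
      (List.Perm.cons n (List.perm_insertionSort pvR L).symm))).trans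
    (List.perm_orderedInsert pvR n _).symm

-- taking three of an ordered insert only needs the first three of the target
lemma pvTake3_OI (n : Int) (t : List Int) :
    (List.orderedInsert pvR n t).take 3 = (List.orderedInsert pvR n (t.take 3)).take 3 := by
  match t with
  | [] => rfl
  | [a] => rfl
  | [a, b] => rfl
  | a :: b :: c :: rest =>
      show (List.orderedInsert pvR n (a :: b :: c :: rest)).take 3
        = (List.orderedInsert pvR n [a, b, c]).take 3
      simp only [List.orderedInsert_cons, List.orderedInsert_nil]
      split_ifs <;> simp [List.take]

-- B's register update realises ordered insert truncated to three, on sorted short lists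
lemma pvStepB_triple (n : Int) (s : List Int) (hs : s.Pairwise pvR) (hl : s.length ≤ 3) :
    pvStepB (pvTriple s) n = pvTriple ((List.orderedInsert pvR n s).take 3) := by
  match s with
  | [] => rfl
  | [a] =>
      show pvStepB (some a, none, none) n = _
      simp only [List.orderedInsert_cons, List.orderedInsert_nil]
      dsimp only [pvStepB]
      simp only [decide_eq_true_eq]
      split_ifs <;>
        first
          | rfl
          | (unfold pvR at *
             simp only [pvTriple, List.getElem?_cons_zero, List.getElem?_cons_succ,
               List.take_succ_cons, List.take_nil, Prod.mk.injEq,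
               Option.some.injEq, List.getElem?_nil, and_true]
             omega)
  | [a, b] =>
      have hba : b ≤ a := by simpa [pvR] using hs
      show pvStepB (some a, some b, none) n = _
      simp only [List.orderedInsert_cons, List.orderedInsert_nil]
      dsimp only [pvStepB]
      simp only [decide_eq_true_eq]
      split_ifs <;>
        first
          | rfl
          | (unfold pvR at *
             simp only [pvTriple, List.getElem?_cons_zero, List.getElem?_cons_succ,
               List.take_succ_cons, List.take_nil, Prod.mk.injEq,
               Option.some.injEq, and_true, true_and]
             omega)
  | [a, b, c] =>
      have hba : b ≤ a := (List.pairwise_cons.1 hs).1 b (by simp)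
      have hca : c ≤ a := (List.pairwise_cons.1 hs).1 c (by simp)
      have hcb : c ≤ b := (List.pairwise_cons.1 (List.pairwise_cons.1 hs).2).1 c (by simp)
      show pvStepB (some a, some b, some c) n = _
      simp only [List.orderedInsert_cons, List.orderedInsert_nil]
      dsimp only [pvStepB]
      simp only [decide_eq_true_eq]
      split_ifs <;>
        first
          | rfl
          | (unfold pvR at *
             simp only [pvTriple, List.getElem?_cons_zero, List.getElem?_cons_succ,
               List.take_succ_cons, List.take_zero, Prod.mk.injEq,
               Option.some.injEq, and_true, true_and]
             omega)
  | _ :: _ :: _ :: _ :: _ => simp at hl; omega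

-- folding B's register update over L keeps the three largest of L
lemma pvFoldB_top3 (L : List Int) :
    L.foldl pvStepB (none, none, none) = pvTriple ((List.insertionSort pvR L).take 3) := by
  induction L using List.reverseRecOn with
  | nil => rfl
  | append_singleton xs n ih =>
      rw [List.foldl_append, List.foldl_cons, List.foldl_nil, ih]
      have hs : ((List.insertionSort pvR xs).take 3).Pairwise pvR :=
        (pvSort_pairwise xs).sublist (List.take_sublist _ _)
      rw [pvStepB_triple n _ hs (by simp), ← pvTake3_OI, ← pvInsertionSort_append]

-- B's seen-set fold factors through the list of first occurrences
lemma pvFoldSeen (bs : List (List Int)) (S : PySem.Set (List Int))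
    (t : Option Int × Option Int × Option Int) :
    bs.foldl (fun st b => if PySem.Set.contains st.1 b then st
        else (PySem.Set.add st.1 b, pvStepB st.2 (b.length : Int))) (S, t)
      = (PySem.Set.update S bs, (pvNew S bs).foldl (fun t b => pvStepB t (b.length : Int)) t) := by
  induction bs generalizing S t with
  | nil => rfl
  | cons b rest ih =>
      by_cases hb : S.contains b
      · have hmem : b ∈ S := by simpa using hb
        have hadd : PySem.Set.add S b = S := by simp [PySem.Set.add, hmem]
        rw [List.foldl_cons]
        simp only [hb, if_true, ih]
        rw [show pvNew S (b :: rest) = pvNew S rest by simp [pvNew, hmem]]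
        rw [show PySem.Set.update S (b :: rest) = PySem.Set.update S rest by
          simp [PySem.Set.update, hadd]]
      · have hmem : b ∉ S := by simpa using hb
        have hadd : PySem.Set.add S b = S ++ [b] := by simp [PySem.Set.add, hmem]
        rw [List.foldl_cons]
        simp only [hb, if_false, Bool.false_eq_true, ih]
        rw [show pvNew S (b :: rest) = b :: pvNew (S ++ [b]) rest by simp [pvNew, hmem]]
        rw [show PySem.Set.update S (b :: rest) = PySem.Set.update (S ++ [b]) rest by
          simp [PySem.Set.update, hadd]]
        rw [hadd, List.foldl_cons]

-- the first occurrences relative to S extend S exactly to its update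
lemma pvNew_update (bs : List (List Int)) (S : PySem.Set (List Int)) :
    PySem.Set.update S bs = S ++ pvNew S bs := by
  induction bs generalizing S with
  | nil => simp [PySem.Set.update, pvNew]
  | cons b rest ih =>
      by_cases hb : S.contains b
      · have hmem : b ∈ S := by simpa using hb
        have hadd : PySem.Set.add S b = S := by simp [PySem.Set.add, hmem]
        rw [show pvNew S (b :: rest) = pvNew S rest by simp [pvNew, hmem]]
        rw [show PySem.Set.update S (b :: rest) = PySem.Set.update S rest by
          simp [PySem.Set.update, hadd]]
        exact ih S
      · have hmem : b ∉ S := by simpa using hb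
        have hadd : PySem.Set.add S b = S ++ [b] := by simp [PySem.Set.add, hmem]
        rw [show pvNew S (b :: rest) = b :: pvNew (S ++ [b]) rest by simp [pvNew, hmem]]
        rw [show PySem.Set.update S (b :: rest) = PySem.Set.update (S ++ [b]) rest by
          simp [PySem.Set.update, hadd]]
        rw [ih (S ++ [b])]
        simp

lemma pvNew_nil (bs : List (List Int)) : pvNew PySem.Set.empty bs = PySem.Set.ofList bs := by
  have h := pvNew_update bs PySem.Set.empty
  rw [PySem.Set.ofList_eq_foldl]
  rw [show (PySem.Set.update PySem.Set.empty bs : List (List Int))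
      = bs.foldl PySem.Set.add PySem.Set.empty from rfl] at h
  simpa [PySem.Set.empty] using h.symm

-- the final register read-out multiplies exactly the kept lengths
lemma pvReadout (s : List Int) (hl : s.length ≤ 3) :
    pvReadB (pvTriple s) = s.prod := by
  match s with
  | [] => rfl
  | [a] => simp [pvTriple, pvReadB]
  | [a, b] => simp [pvTriple, pvReadB]; try ring
  | [a, b, c] => simp [pvTriple, pvReadB]; try ring
  | _ :: _ :: _ :: _ :: _ => simp at hl; omega

-- ===== VERDICT (by name: the statement is the Claim_ definition above) =====
theorem calc_total_bassin_size_spec : Claim_equal_calc_total_bassin_size := by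
  intro bassins _
  show calc_total_bassin_size bassins = calc_total_bassin_size_alt bassins
  -- the common value: product of the three largest lengths of the dedup'd bassins
  have hB : calc_total_bassin_size_alt bassins
      = ((List.insertionSort pvR ((PySem.Set.ofList bassins).map (fun b => (b.length : Int)))).take 3).prod := by
    unfold calc_total_bassin_size_alt
    rw [pvFoldSeen, pvNew_nil]
    have hfold : (PySem.Set.ofList bassins).foldl (fun t b => pvStepB t (b.length : Int))
        (none, none, none)
        = ((PySem.Set.ofList bassins).map (fun b => (b.length : Int))).foldl pvStepB
          (none, none, none) := by rw [List.foldl_map]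
    show pvReadB ((PySem.Set.ofList bassins).foldl (fun t b => pvStepB t (b.length : Int))
        (none, none, none)) = _
    rw [hfold, pvFoldB_top3, pvReadout _ (by simp)]
  rw [hB]
  unfold calc_total_bassin_size
  simp only []
  set ub := bassins.foldl pvStepA PySem.Dict.empty with hub
  have hub' : (bassins.foldl (fun d b =>
      d.modify ((b.length : Int)) [] (fun lst => if lst.contains b then lst else lst ++ [b]))
      PySem.Dict.empty) = ub := rfl
  rw [hub']
  have hkeys : ub.keys = PySem.Set.ofList (bassins.map (fun b => (b.length : Int))) := by
    rw [hub]
    exact PySem.Dict.keys_foldl_modify_key bassins (fun b => ((b.length : Int))) []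
      (fun _ b lst => if lst.contains b then lst else lst ++ [b]) PySem.Dict.empty
  have hget : ∀ k, ub.getD k [] = PySem.Set.ofList (bassins.filter (fun b => (b.length : Int) == k)) := by
    intro k
    rw [hub, pvBucket]
    rfl
  set ks := PySem.List.sorted ub.keys (fun x => x) true with hks2
  have hfold : (ks.foldl (fun st k => pvInnerA k (ub.getD k []) st) ((3 : Int), (1 : Int)))
      = (ks.flatMap (fun k => List.replicate (ub.getD k []).length k)).foldl pvStep2 (3, 1) := by
    rw [List.foldl_flatMap]
    congr 1
    funext st k
    exact pvInnerA_eq_foldl k (ub.getD k []) st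
  rw [hfold]
  have hflat : (ks.flatMap (fun k => List.replicate (ub.getD k []).length k))
      = PySem.List.sorted ((PySem.Set.ofList bassins).map (fun b => (b.length : Int))) (fun x => x) true := by
    have hfn : (fun k => List.replicate (ub.getD k []).length k)
        = (fun k => List.replicate (PySem.Set.ofList (bassins.filter (fun b => (b.length : Int) == k))).length k) := by
      funext k; rw [hget k]
    rw [hfn, hks2, hkeys, pvFlat_eq_sorted]
  rw [hflat, pvFoldl_step2_spec _ 3 1 (by norm_num), pvSorted_eq_insertionSort]
  norm_num
  rfl
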